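-- pv_equiv track=rewrite | github.com/dmoskvin4/myfuzz | cov_metrics/reg/crossover.py | insert_code_blocks
-- ===== SOURCE A (Python) =====
-- def insert_code_blocks(lines, new_code_blocks):
--     start_idx = None
--     end_idx = None
--
--     # Найти индекс начала и конца вставки
--     for i, line in enumerate(lines):
--         if "_fuzz_main:" in line:
--             start_idx = i
--             end_idx = i + 1
--             break
--
--     if start_idx is None or end_idx is None:
--         raise ValueError("Не найдены метки _fuzz_main или // RVTEST_CODE_END")
--
--     # Генерация новых строк с метками
--     generated_lines = []
--     for i, block in enumerate(new_code_blocks):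
--         generated_lines.append(f"_l{i}:    {block[0]}                    ;\n")
--         for instruction in block[1:]:
--             generated_lines.append(f"      {instruction.strip()}         ;\n")
--
--     # Вставка новых строк
--     prefix = lines[:start_idx + 1]
--     suffix = lines[end_idx:]
--     prefix[:] = [f'{p}\n' for p in prefix]
--     suffix[:] = [f'{p}\n' for p in suffix]
--
--     updated_lines = prefix + generated_lines + suffix
--     return updated_lines
-- ===== SOURCE B (Python) =====
-- def insert_code_blocks(lines, new_code_blocks):
--     generated_lines = []
--     for i, block in enumerate(new_code_blocks):
--         generated_lines.append(f"_l{i}:    {block[0]}                    ;\n")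
--         for instruction in block[1:]:
--             generated_lines.append(f"      {instruction.strip()}         ;\n")
--     result = []
--     inserted = False
--     for line in lines:
--         result.append(f"{line}\n")
--         if not inserted and "_fuzz_main:" in line:
--             result.extend(generated_lines)
--             inserted = True
--     if not inserted:
--         raise ValueError("Не найдены метки _fuzz_main или // RVTEST_CODE_END")
--     return result
-- ===== Notes on version B (the rewrite author's own statement) =====
-- stated objective: simpler
-- what changed: Replaces A's index search plus list slicing, per-slice newline rewrites and three-way concatenation by one pass over the lines with an 'inserted' flag that splices the generated block right after the first marker line.
import Mathlib
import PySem

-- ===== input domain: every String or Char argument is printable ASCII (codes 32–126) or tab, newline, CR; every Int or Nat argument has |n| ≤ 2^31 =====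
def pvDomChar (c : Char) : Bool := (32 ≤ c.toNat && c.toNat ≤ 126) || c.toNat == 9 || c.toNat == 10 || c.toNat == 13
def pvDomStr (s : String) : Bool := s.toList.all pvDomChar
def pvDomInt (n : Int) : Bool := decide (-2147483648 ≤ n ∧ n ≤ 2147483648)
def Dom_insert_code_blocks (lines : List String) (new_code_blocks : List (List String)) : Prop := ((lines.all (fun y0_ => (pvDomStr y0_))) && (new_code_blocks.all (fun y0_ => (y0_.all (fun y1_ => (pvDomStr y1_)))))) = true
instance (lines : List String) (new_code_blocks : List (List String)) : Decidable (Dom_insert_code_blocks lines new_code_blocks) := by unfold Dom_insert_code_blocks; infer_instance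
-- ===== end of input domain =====

-- B replaces A's index search + slicing + three-way concatenation by a single pass with an
-- 'inserted' flag (objective: simpler); return value only, neither side mutates its input.

-- ===== PORT A =====
-- shared formatting of one generated block (identical code in Source A and Source B)
def pvFmtBlock (i : Int) (block : List String) : List String :=
  match block with
  | [] => []  -- unreachable inside Pre_: Python raises IndexError on block[0]
  | b0 :: rest =>
      ("_l" ++ PySem.Int.toStr i ++ ":    " ++ b0 ++ "                    ;\n")
        :: rest.map (fun instruction => "      " ++ PySem.Str.strip instruction ++ "         ;\n")

def pvGenerated (new_code_blocks : List (List String)) : List String :=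
  (PySem.List.enumerate new_code_blocks).foldl (fun acc p => acc ++ pvFmtBlock p.1 p.2) []

-- the first-match search loop of A ('for i, line in enumerate(lines): if "_fuzz_main:" in line: … break')
def pvFindMarker : List String → Nat → Option Nat
  | [], _ => none
  | l :: ls, i => if PySem.Str.isIn "_fuzz_main:" l then some i else pvFindMarker ls (i + 1)

def insert_code_blocks (lines : List String) (new_code_blocks : List (List String)) : List String :=
  match pvFindMarker lines 0 with
  | none => []  -- Python raises ValueError here; excluded by Pre_
  | some start_idx =>
      let generated_lines := pvGenerated new_code_blocks
      let pfx := (lines.take (start_idx + 1)).map (fun p => p ++ "\n")  -- lines[:start_idx+1], then '\n' appended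
      let sfx := (lines.drop (start_idx + 1)).map (fun p => p ++ "\n")  -- lines[end_idx:] with end_idx = start_idx+1
      pfx ++ generated_lines ++ sfx

-- ===== PORT B =====
-- the single result-building loop of Source B, carrying the 'inserted' flag
def pvInsertLoop (generated : List String) : List String → Bool → List String
  | [], _ => []
  | l :: ls, inserted =>
      if !inserted && PySem.Str.isIn "_fuzz_main:" l then
        (l ++ "\n") :: (generated ++ pvInsertLoop generated ls true)
      else
        (l ++ "\n") :: pvInsertLoop generated ls inserted

def insert_code_blocks_alt (lines : List String) (new_code_blocks : List (List String)) : List String :=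
  pvInsertLoop (pvGenerated new_code_blocks) lines false

-- ===== PRECONDITION & SPEC =====
-- Pre_ excludes the inputs where the Python programs raise: no line contains the marker
-- (ValueError) or some code block is empty (IndexError on block[0]).
def Pre_insert_code_blocks (lines : List String) (new_code_blocks : List (List String)) : Prop :=
  (lines.any (fun l => PySem.Str.isIn "_fuzz_main:" l)
    && new_code_blocks.all (fun b => !b.isEmpty)) = true
instance (lines : List String) (new_code_blocks : List (List String)) : Decidable (Pre_insert_code_blocks lines new_code_blocks) := by unfold Pre_insert_code_blocks; infer_instance

def pvWitness_insert_code_blocks : List String × List (List String) :=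
  (["a", "_fuzz_main:", "b"], [["add", " sub "]])

def Spec_insert_code_blocks (lines : List String) (new_code_blocks : List (List String)) (out : List String) : Prop := out = insert_code_blocks_alt lines new_code_blocks
instance (lines : List String) (new_code_blocks : List (List String)) (out : List String) : Decidable (Spec_insert_code_blocks lines new_code_blocks out) := by unfold Spec_insert_code_blocks; infer_instance

-- ===== CLAIM (what is proved, stated in full; the proofs are below) =====
def Claim_equal_insert_code_blocks : Prop := ∀ (lines : List String) (new_code_blocks : List (List String)), Dom_insert_code_blocks lines new_code_blocks → Pre_insert_code_blocks lines new_code_blocks → Spec_insert_code_blocks lines new_code_blocks (insert_code_blocks lines new_code_blocks)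

-- ===== LEMMAS AND PROOFS =====

theorem pvWitness_ok :
    Dom_insert_code_blocks pvWitness_insert_code_blocks.1 pvWitness_insert_code_blocks.2 ∧
    Pre_insert_code_blocks pvWitness_insert_code_blocks.1 pvWitness_insert_code_blocks.2 := by
  decide

-- the search counter only shifts the result
theorem pvFindMarker_shift (ls : List String) (i : Nat) :
    pvFindMarker ls i = (pvFindMarker ls 0).map (· + i) := by
  induction ls generalizing i with
  | nil => simp [pvFindMarker]
  | cons l ls ih =>
      by_cases hm : PySem.Str.isIn "_fuzz_main:" l = true
      · simp only [pvFindMarker, if_pos hm]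
        simp
      · simp only [pvFindMarker, if_neg hm]
        rw [ih (i + 1), ih 1, Option.map_map]
        cases pvFindMarker ls 0 <;> simp <;> omega

-- once inserted, the loop just maps '\n' onto the rest
theorem pvInsertLoop_true (g : List String) (ls : List String) :
    pvInsertLoop g ls true = ls.map (fun p => p ++ "\n") := by
  induction ls with
  | nil => rfl
  | cons l ls ih => simp [pvInsertLoop, ih]

-- main correspondence: if the first marker is at index s, the one-pass loop equals A's
-- take/insert/drop assembly
theorem pvInsertLoop_of_find (g : List String) (ls : List String) (s : Nat)
    (h : pvFindMarker ls 0 = some s) :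
    pvInsertLoop g ls false =
      (ls.take (s + 1)).map (fun p => p ++ "\n") ++ g ++ (ls.drop (s + 1)).map (fun p => p ++ "\n") := by
  induction ls generalizing s with
  | nil => simp [pvFindMarker] at h
  | cons l ls ih =>
      by_cases hm : PySem.Str.isIn "_fuzz_main:" l = true
      · rw [pvFindMarker, if_pos hm] at h
        injection h with h
        subst h
        simp only [pvInsertLoop, Bool.not_false, Bool.true_and, if_pos hm, pvInsertLoop_true]
        simp
      · rw [pvFindMarker, if_neg hm, pvFindMarker_shift ls 1] at h
        cases ht : pvFindMarker ls 0 with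
        | none => rw [ht] at h; simp at h
        | some t =>
            rw [ht] at h
            simp only [Option.map_some, Option.some.injEq] at h
            subst h
            simp only [pvInsertLoop, Bool.not_false, Bool.true_and, if_neg hm]
            rw [ih t ht]
            simp [List.take_succ_cons, List.drop_succ_cons]

-- Pre_ guarantees the search succeeds
theorem pvFindMarker_isSome (ls : List String)
    (h : ls.any (fun l => PySem.Str.isIn "_fuzz_main:" l) = true) :
    ∃ s, pvFindMarker ls 0 = some s := by
  induction ls with
  | nil => simp at h
  | cons l ls ih =>
      by_cases hm : PySem.Str.isIn "_fuzz_main:" l = true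
      · exact ⟨0, by rw [pvFindMarker, if_pos hm]⟩
      · simp only [List.any_cons, hm, Bool.false_or] at h
        obtain ⟨t, ht⟩ := ih h
        refine ⟨t + 1, ?_⟩
        rw [pvFindMarker, if_neg hm, pvFindMarker_shift ls 1, ht]
        rfl

-- ===== VERDICT (by name: the statement is the Claim_ definition above) =====
theorem insert_code_blocks_spec : Claim_equal_insert_code_blocks := by
  intro lines new_code_blocks _ hpre
  unfold Spec_insert_code_blocks insert_code_blocks insert_code_blocks_alt
  have hany : lines.any (fun l => PySem.Str.isIn "_fuzz_main:" l) = true := by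
    unfold Pre_insert_code_blocks at hpre
    exact (Bool.and_eq_true ..).mp hpre |>.1
  obtain ⟨s, hs⟩ := pvFindMarker_isSome lines hany
  rw [hs]
  exact (pvInsertLoop_of_find (pvGenerated new_code_blocks) lines s hs).symm
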